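-- pv_equiv track=rewrite | github.com/liangjiali0304/Greenlandings | panacea.py | search_air_2
-- ===== SOURCE A (Python) =====
-- def search_air(data,airline):
--     match = []
--     for i in range(len(data)):
--         if airline in str(data[i]) :
--             match.append(i)
--     return match
--
-- def search_air_2(data1,airline1,data2,airline2,NOT2=False):
--    # calls the function do one key_word search
--     match1 = search_air(data1,airline1)
--     match2 = []
--     for i in match1:
--         if NOT2 == False:
--             if airline2 in str(data2[i]) :
--                 match2.append(i)
--         if NOT2 == True:
--             if airline2 not in str(data2[i]) :
--                 match2.append(i)
--
--     return match2
-- ===== SOURCE B (Python) =====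
-- def search_air_2(data1, airline1, data2, airline2, NOT2=False):
--     # single pass over the paired rows: keep indices whose data1 row contains
--     # airline1 and whose data2 row's airline2-match disagrees with NOT2
--     return [i for i, (x, y) in enumerate(zip(data1, data2))
--             if airline1 in str(x) and (airline2 in str(y)) != bool(NOT2)]
-- ===== Notes on version B (the rewrite author's own statement) =====
-- stated objective: simpler
-- what changed: Replaces A's two sequential passes (build an index list of airline1 matches, then re-filter it against data2 with separate NOT2 branches) by a single zip/enumerate comprehension whose xor-style test '(airline2 in y) != NOT2' merges both NOT2 branches; the intermediate index list disappears.
import Mathlib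
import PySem

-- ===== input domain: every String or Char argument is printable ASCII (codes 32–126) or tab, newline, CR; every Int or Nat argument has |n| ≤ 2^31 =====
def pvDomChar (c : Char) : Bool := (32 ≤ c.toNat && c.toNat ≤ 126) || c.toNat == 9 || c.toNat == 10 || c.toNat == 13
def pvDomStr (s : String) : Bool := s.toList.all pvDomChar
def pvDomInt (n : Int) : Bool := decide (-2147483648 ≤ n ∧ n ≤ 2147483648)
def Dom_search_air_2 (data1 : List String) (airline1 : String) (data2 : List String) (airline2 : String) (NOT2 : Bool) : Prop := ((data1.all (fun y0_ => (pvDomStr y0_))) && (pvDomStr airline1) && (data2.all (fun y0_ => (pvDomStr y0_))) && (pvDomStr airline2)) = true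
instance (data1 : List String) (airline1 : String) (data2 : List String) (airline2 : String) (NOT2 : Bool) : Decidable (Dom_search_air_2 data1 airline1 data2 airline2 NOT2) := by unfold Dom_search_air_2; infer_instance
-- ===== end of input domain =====

-- B fuses A's two passes (index list of airline1 matches, then a NOT2-branched re-filter
-- against data2) into one zip/enumerate comprehension with an xor-style test: simpler, same cost.


-- ===== PORT A =====
-- helper search_air: for i in range(len(data)): if airline in str(data[i]): match.append(i)
def pvSearchAir (data : List String) (airline : String) : List Int :=
  (PySem.List.pyRange 0 (PySem.List.len data) 1).foldl
    (fun m i => if PySem.Str.isIn airline (PySem.List.pyGetD data i "") then m ++ [i] else m) []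

-- for i in match1: two sequential 'if NOT2 == False/True' branches, data2[i] may raise
-- IndexError (pyGet? = none); those inputs are excluded by Pre_search_air_2, the getD
-- defaults there are never the claimed value.
def search_air_2 (data1 : List String) (airline1 : String) (data2 : List String) (airline2 : String) (NOT2 : Bool) : List Int :=
  let match1 := pvSearchAir data1 airline1
  match1.foldl
    (fun match2 i =>
      let match2 :=
        if NOT2 = false then
          (if ((PySem.List.pyGet? data2 i).map (fun s => PySem.Str.isIn airline2 s)).getD false
           then match2 ++ [i] else match2)
        else match2
      if NOT2 = true then
        (if ((PySem.List.pyGet? data2 i).map (fun s => PySem.Str.isIn airline2 s)).getD true = false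
         then match2 ++ [i] else match2)
      else match2) []

-- ===== PORT B =====
def search_air_2_alt (data1 : List String) (airline1 : String) (data2 : List String) (airline2 : String) (NOT2 : Bool) : List Int :=
  (PySem.List.enumerate (data1.zip data2) 0).filterMap
    (fun p =>
      if PySem.Str.isIn airline1 p.2.1 && (PySem.Str.isIn airline2 p.2.2 != NOT2)
      then some p.1 else none)

-- ===== PRECONDITION & SPEC =====
-- Pre_ excludes exactly the inputs where A raises IndexError: an airline1-matching index
-- at or beyond len(data2).
def Pre_search_air_2 (data1 : List String) (airline1 : String) (data2 : List String) (airline2 : String) (NOT2 : Bool) : Prop :=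
  ∀ (i : Nat) (h : i < data1.length), PySem.Str.isIn airline1 data1[i] = true → i < data2.length
instance (data1 : List String) (airline1 : String) (data2 : List String) (airline2 : String) (NOT2 : Bool) : Decidable (Pre_search_air_2 data1 airline1 data2 airline2 NOT2) := by unfold Pre_search_air_2; infer_instance
def pvWitness_search_air_2 : List String × String × List String × String × Bool :=
  (["KLM 123", "AF 77", "KLM 9"], "KLM", ["Canc", "OK", "del"], "l", false)

def Spec_search_air_2 (data1 : List String) (airline1 : String) (data2 : List String) (airline2 : String) (NOT2 : Bool) (out : List Int) : Prop := out = search_air_2_alt data1 airline1 data2 airline2 NOT2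
instance (data1 : List String) (airline1 : String) (data2 : List String) (airline2 : String) (NOT2 : Bool) (out : List Int) : Decidable (Spec_search_air_2 data1 airline1 data2 airline2 NOT2 out) := by unfold Spec_search_air_2; infer_instance

-- ===== CLAIM (what is proved, stated in full; the proofs are below) =====
def Claim_equal_search_air_2 : Prop := ∀ (data1 : List String) (airline1 : String) (data2 : List String) (airline2 : String) (NOT2 : Bool), Dom_search_air_2 data1 airline1 data2 airline2 NOT2 → Pre_search_air_2 data1 airline1 data2 airline2 NOT2 → Spec_search_air_2 data1 airline1 data2 airline2 NOT2 (search_air_2 data1 airline1 data2 airline2 NOT2)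
-- ===== LEMMAS AND PROOFS =====

-- keep-if-test comprehension shape of B's filterMap
theorem pv_filterMap_guard (l : List Int) (c : Int → Bool) :
    l.filterMap (fun j => if c j then some j else none) = l.filter c := by
  induction l with
  | nil => rfl
  | cons x xs ih => by_cases h : c x <;> simp [h, ih]

-- B as a filter over the index range of the zipped lists
theorem pv_alt_eq_filter (data1 : List String) (airline1 : String) (data2 : List String)
    (airline2 : String) (NOT2 : Bool) :
    search_air_2_alt data1 airline1 data2 airline2 NOT2 =
      (PySem.List.pyRange 0 (PySem.List.len (data1.zip data2)) 1).filter
        (fun j => PySem.Str.isIn airline1 (PySem.List.pyGetD (data1.zip data2) j ("", "")).1 &&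
          (PySem.Str.isIn airline2 (PySem.List.pyGetD (data1.zip data2) j ("", "")).2 != NOT2)) := by
  unfold search_air_2_alt
  rw [PySem.List.enumerate_eq_map_pyRange (data1.zip data2) ("", ""), List.filterMap_map]
  exact pv_filterMap_guard _ _

-- A as a filter over the index range of data1 (both NOT2 branches)
theorem pv_a_eq_filter (data1 : List String) (airline1 : String) (data2 : List String)
    (airline2 : String) (NOT2 : Bool) :
    search_air_2 data1 airline1 data2 airline2 NOT2 =
      (PySem.List.pyRange 0 (PySem.List.len data1) 1).filter
        (fun i => PySem.Str.isIn airline1 (PySem.List.pyGetD data1 i "") &&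
          (((PySem.List.pyGet? data2 i).map (fun s => PySem.Str.isIn airline2 s)).getD NOT2 != NOT2)) := by
  unfold search_air_2 pvSearchAir
  cases NOT2 with
  | false =>
      simp only [Bool.false_eq_true, if_false, if_true,
        PySem.List.foldl_append_if_eq_filter, List.nil_append, List.filter_filter]
      exact List.filter_congr (fun x _ => by cases h : ((PySem.List.pyGet? data2 x).map
        (fun s => PySem.Str.isIn airline2 s)).getD false <;> simp [*])
  | true =>
      simp only [Bool.true_eq_false, if_false, if_true,
        PySem.List.foldl_append_if_eq_filter, PySem.List.foldl_append_ite_eq_filter,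
        List.nil_append, List.filter_filter]
      exact List.filter_congr (fun x _ => by cases h : ((PySem.List.pyGet? data2 x).map
        (fun s => PySem.Str.isIn airline2 s)).getD true <;> simp [*])

-- ===== VERDICT (by name: the statement is the Claim_ definition above) =====
theorem search_air_2_spec : Claim_equal_search_air_2 := by
  intro data1 airline1 data2 airline2 NOT2 _hdom hpre
  unfold Spec_search_air_2
  rw [pv_a_eq_filter, pv_alt_eq_filter]
  have hlen : PySem.List.len (data1.zip data2) = ((min data1.length data2.length : Nat) : Int) := by
    simp [PySem.List.len_eq]
  rw [hlen]
  have hmle : ((min data1.length data2.length : Nat) : Int) ≤ (PySem.List.len data1) := by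
    simp [PySem.List.len_eq]
  rw [PySem.List.pyRange_one_append 0 ((min data1.length data2.length : Nat) : Int)
    (PySem.List.len data1) (by positivity) hmle, List.filter_append]
  have htail : ((PySem.List.pyRange ((min data1.length data2.length : Nat) : Int)
      (PySem.List.len data1) 1).filter
        (fun i => PySem.Str.isIn airline1 (PySem.List.pyGetD data1 i "") &&
          (((PySem.List.pyGet? data2 i).map (fun s => PySem.Str.isIn airline2 s)).getD NOT2 != NOT2))) = [] := by
    rw [List.filter_eq_nil_iff]
    intro i hi
    rw [PySem.List.mem_pyRange_one] at hi
    simp only [PySem.List.len_eq, Nat.cast_min] at hi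
    have h0 : (0:Int) ≤ i := le_trans (by positivity) hi.1
    have h1' : i < (data1.length : Int) := hi.2
    rw [PySem.List.pyGetD_eq_getElem data1 "" h0 h1']
    have hn2 : (data2.length : Int) ≤ i := by omega
    have hfalse : PySem.Str.isIn airline1 data1[i.toNat] = false := by
      by_contra hc
      have := hpre i.toNat (by omega) (by simpa using hc)
      omega
    simp only [PySem.Str.isIn] at hfalse
    simp [PySem.Str.isIn, hfalse]
  rw [htail, List.append_nil]
  apply List.filter_congr
  intro x hx
  rw [PySem.List.mem_pyRange_one] at hx
  have h0 : (0:Int) ≤ x := hx.1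
  have hx2 := hx.2
  rw [Nat.cast_min] at hx2
  have h1' : x < (data1.length : Int) := by omega
  have h2' : x < (data2.length : Int) := by omega
  have hz' : x < ((data1.zip data2).length : Int) := by simp [List.length_zip]; omega
  rw [PySem.List.pyGetD_eq_getElem data1 "" h0 h1',
      PySem.List.pyGetD_eq_getElem (data1.zip data2) ("", "") h0 hz',
      PySem.List.pyGet?_eq_some_getElem data2 h0 h2']
  simp [List.getElem_zip]
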